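-- pv_equiv track=rewrite | github.com/logan-lampton/neetcode | leetcode/1742_Maximum_Number_of_Balls_in_a_Box.py | countBalls
-- ===== SOURCE A (Python) =====
-- def countBalls(lowLimit: int, highLimit: int) -> int:
--     boxes_with_balls = []
--     for i in range(lowLimit, highLimit + 1):
--         str_balls = str(i)
--         box_num = 0
--         for i in range(len(str_balls)):
--             box_num += int(str_balls[i])
--         boxes_with_balls.append(box_num)
--
--     dictionary = {}
--     for i in range(len(boxes_with_balls)):
--         if boxes_with_balls[i] not in dictionary:
--             dictionary[boxes_with_balls[i]] = 1
--         else: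
--             dictionary[boxes_with_balls[i]] += 1
--
--     return max(dictionary.values())
-- ===== SOURCE B (Python) =====
-- def countBalls(lowLimit: int, highLimit: int) -> int:
--     counts = {}
--     for n in range(lowLimit, highLimit + 1):
--         s = 0
--         while n > 0:
--             s += n % 10
--             n //= 10
--         counts[s] = counts.get(s, 0) + 1
--     return max(counts.values())
-- ===== Notes on version B (the rewrite author's own statement) =====
-- stated objective: faster
-- what changed: A single fused pass with arithmetic digit extraction (n%10 / n//=10) and dict.get counting replaces A's three passes (a digit-sum list built via str() and per-character int(), then a membership-tested counting loop indexing that list, then max over the values).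
import Mathlib
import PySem

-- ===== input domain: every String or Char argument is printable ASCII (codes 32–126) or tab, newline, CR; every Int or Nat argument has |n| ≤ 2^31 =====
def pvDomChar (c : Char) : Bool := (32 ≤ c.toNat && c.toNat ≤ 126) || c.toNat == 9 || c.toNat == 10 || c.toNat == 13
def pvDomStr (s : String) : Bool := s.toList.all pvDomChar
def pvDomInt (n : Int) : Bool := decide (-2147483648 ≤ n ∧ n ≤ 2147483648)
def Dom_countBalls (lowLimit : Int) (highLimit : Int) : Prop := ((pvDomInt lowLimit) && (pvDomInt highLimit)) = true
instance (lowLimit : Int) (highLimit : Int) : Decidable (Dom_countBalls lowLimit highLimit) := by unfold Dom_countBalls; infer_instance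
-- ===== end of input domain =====

-- B: one fused pass with arithmetic digit extraction (n%10, n//=10) and dict.get counting,
-- instead of A's three passes (string digit sums into a list, then a membership-tested
-- counting loop indexing that list, then max over the dict values).

-- ===== PORT A =====

-- int(str_balls[i]) for the one-character string str_balls[i]
def pvCharVal (c : Char) : Int := (PySem.Int.ofChars? [c]).getD 0

def countBalls (lowLimit : Int) (highLimit : Int) : Int :=
  let boxes_with_balls : List Int :=
    (PySem.List.pyRange lowLimit (highLimit + 1) 1).foldl
      (fun acc i =>
        let str_balls := PySem.Int.toChars i
        let box_num :=
          (PySem.List.pyRange 0 (str_balls.length : Int) 1).foldl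
            (fun b j => b + pvCharVal (PySem.List.pyGetD str_balls j ' ')) 0
        acc ++ [box_num]) []
  let dictionary : PySem.Dict Int Int :=
    (PySem.List.pyRange 0 (boxes_with_balls.length : Int) 1).foldl
      (fun d i =>
        let k := PySem.List.pyGetD boxes_with_balls i 0
        if ¬ (d.contains k = true) then d.insert k 1
        else d.insert k (d.getD k 0 + 1)) (PySem.Dict.empty : PySem.Dict Int Int)
  match PySem.List.max? dictionary.values (fun v => v) with
  | some m => m
  | none => 0    -- Python raises ValueError here (empty range); excluded by Pre_

-- ===== PORT B =====

-- the 'while n > 0: s += n % 10; n //= 10' loop of Source B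
def pvDsLoop (n s : Int) : Int :=
  if _h : 0 < n then pvDsLoop (PySem.Int.floordiv n 10) (s + PySem.Int.mod n 10) else s
termination_by n.toNat
decreasing_by
  have h2 : PySem.Int.floordiv n 10 = n / 10 := PySem.Int.floordiv_eq_ediv_of_pos (by omega)
  rw [h2]; omega

def countBalls_alt (lowLimit : Int) (highLimit : Int) : Int :=
  let counts : PySem.Dict Int Int :=
    (PySem.List.pyRange lowLimit (highLimit + 1) 1).foldl
      (fun d n =>
        let s := pvDsLoop n 0
        d.insert s (d.getD s 0 + 1)) PySem.Dict.empty
  match PySem.List.max? counts.values (fun v => v) with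
  | some m => m
  | none => 0    -- Python raises ValueError here (empty range); excluded by Pre_

-- ===== PRECONDITION & SPEC =====
-- A raises ValueError outside: int('-') on the sign of a negative number when lowLimit < 0,
-- and max() of an empty dict when lowLimit > highLimit.
def Pre_countBalls (lowLimit : Int) (highLimit : Int) : Prop :=
  0 ≤ lowLimit ∧ lowLimit ≤ highLimit
instance (lowLimit : Int) (highLimit : Int) : Decidable (Pre_countBalls lowLimit highLimit) := by
  unfold Pre_countBalls; infer_instance

def pvWitness_countBalls : Int × Int := (1, 10)

def Spec_countBalls (lowLimit : Int) (highLimit : Int) (out : Int) : Prop := out = countBalls_alt lowLimit highLimit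
instance (lowLimit : Int) (highLimit : Int) (out : Int) : Decidable (Spec_countBalls lowLimit highLimit out) := by unfold Spec_countBalls; infer_instance

-- ===== CLAIM (what is proved, stated in full; the proofs are below) =====
def Claim_equal_countBalls : Prop := ∀ (lowLimit : Int) (highLimit : Int), Dom_countBalls lowLimit highLimit → Pre_countBalls lowLimit highLimit → Spec_countBalls lowLimit highLimit (countBalls lowLimit highLimit)

-- ===== LEMMAS AND PROOFS =====

-- digit sum of a natural number, the recursion both ports compute
def pvDsN (n : Nat) : Nat :=
  if h : n = 0 then 0 else n % 10 + pvDsN (n / 10)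
decreasing_by exact Nat.div_lt_self (Nat.pos_of_ne_zero h) (by omega)

lemma pvCharVal_digitChar (r : Nat) (hr : r < 10) : pvCharVal (Nat.digitChar r) = (r : Int) := by
  interval_cases r <;> decide

lemma pvCharSum_toDigitsCore (f : Nat) :
    ∀ (n : Nat) (acc : List Char), n < 10 ^ f →
      ((Nat.toDigitsCore 10 f n acc).map pvCharVal).sum
        = (pvDsN n : Int) + ((acc.map pvCharVal).sum) := by
  induction f with
  | zero =>
      intro n acc h
      interval_cases n
      simp [Nat.toDigitsCore, pvDsN]
  | succ f ih =>
      intro n acc h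
      rw [Nat.toDigitsCore]
      by_cases h0 : n / 10 = 0
      · have hn : n < 10 := by omega
        rw [if_pos h0]
        have hds : pvDsN n = n := by
          rw [pvDsN]
          split_ifs with hz
          · omega
          · rw [h0, pvDsN]
            simp [Nat.mod_eq_of_lt hn]
        rw [Nat.mod_eq_of_lt hn]
        simp [pvCharVal_digitChar n hn, hds]
      · rw [if_neg h0]
        have hdiv : n / 10 < 10 ^ f := by
          rw [Nat.div_lt_iff_lt_mul (by omega)]
          calc n < 10 ^ (f + 1) := h
            _ = 10 ^ f * 10 := by ring
        rw [ih (n / 10) _ hdiv]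
        have hz : n ≠ 0 := by intro hz; subst hz; simp at h0
        conv_rhs => rw [pvDsN, dif_neg hz]
        simp [pvCharVal_digitChar (n % 10) (Nat.mod_lt _ (by omega))]
        ring

lemma pvDsLoop_natCast (m : Nat) : ∀ s : Int, pvDsLoop (m : Int) s = s + (pvDsN m : Int) := by
  induction m using Nat.strong_induction_on with
  | _ m ih =>
      intro s
      rw [pvDsLoop]
      by_cases hm : m = 0
      · subst hm; simp [pvDsN]
      · rw [dif_pos (by exact_mod_cast Nat.pos_of_ne_zero hm)]
        have h1 : PySem.Int.floordiv (m : Int) 10 = ((m / 10 : Nat) : Int) := by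
          rw [PySem.Int.floordiv_eq_ediv_of_pos (by omega)]; omega
        have h2 : PySem.Int.mod (m : Int) 10 = ((m % 10 : Nat) : Int) := by
          rw [PySem.Int.mod_eq_emod_of_pos (by omega)]; omega
        rw [h1, h2, ih (m / 10) (Nat.div_lt_self (Nat.pos_of_ne_zero hm) (by omega))]
        conv_rhs => rw [pvDsN, dif_neg hm]
        push_cast
        ring

-- the key function both programs bucket by
lemma pvStringDigitSum_eq (i : Int) (hi : 0 ≤ i) :
    (PySem.List.pyRange 0 ((PySem.Int.toChars i).length : Int) 1).foldl
        (fun b j => b + pvCharVal (PySem.List.pyGetD (PySem.Int.toChars i) j ' ')) 0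
      = pvDsLoop i 0 := by
  rw [PySem.List.foldl_pyRange_zero_pyGetD' (PySem.Int.toChars i) ' '
        (fun b c => b + pvCharVal c) 0]
  rw [PySem.List.foldl_add]
  have htc : PySem.Int.toChars i = Nat.toDigits 10 i.toNat := by
    simp [PySem.Int.toChars, not_lt.mpr hi]
  rw [htc]
  have := pvCharSum_toDigitsCore (i.toNat + 1) i.toNat []
    (lt_of_lt_of_le (Nat.lt_pow_self (by omega)) (Nat.pow_le_pow_right (by omega) (by omega)))
  rw [Nat.toDigits] at *
  rw [this]
  have h3 : pvDsLoop i 0 = (pvDsN i.toNat : Int) := by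
    conv_lhs => rw [← Int.toNat_of_nonneg hi]
    rw [pvDsLoop_natCast]
    ring
  rw [h3]
  simp

-- A's dict loop over the key list is the counter
lemma pvA_dict (S : List Int) :
    S.foldl (fun d k => if ¬ (d.contains k = true) then d.insert k 1
                        else d.insert k (d.getD k 0 + 1)) PySem.Dict.empty
      = PySem.Dict.counter S := by
  rw [← PySem.Dict.foldl_insert_getD_add_one_eq_counter]
  apply PySem.List.foldl_congr_mem
  intro d k _
  by_cases h : d.contains k = true
  · simp [h]
  · have hcf : d.contains k = false := by revert h; cases d.contains k <;> simp
    have : d.getD k 0 = 0 := PySem.Dict.getD_of_not_contains d 0 hcf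
    simp [h, this]

-- assembling: both ports build Counter(digit sums) and take max over its values
lemma pvMain (lowLimit highLimit : Int) (hlo : 0 ≤ lowLimit) :
    countBalls lowLimit highLimit = countBalls_alt lowLimit highLimit := by
  unfold countBalls countBalls_alt
  simp only []
  set L := PySem.List.pyRange lowLimit (highLimit + 1) 1 with hL
  -- A's first loop builds the list of string digit sums; rewrite it to map of pvDsLoop
  have hboxes : L.foldl
      (fun acc i =>
        acc ++ [(PySem.List.pyRange 0 ((PySem.Int.toChars i).length : Int) 1).foldl
          (fun b j => b + pvCharVal (PySem.List.pyGetD (PySem.Int.toChars i) j ' ')) 0]) []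
      = L.map (fun n => pvDsLoop n 0) := by
    rw [PySem.List.foldl_append_singleton_eq_map]
    simp only [List.nil_append]
    apply List.map_congr_left
    intro i hiL
    have : lowLimit ≤ i := ((PySem.List.mem_pyRange_one).mp (hL ▸ hiL)).1
    exact pvStringDigitSum_eq i (by omega)
  rw [hboxes]
  -- A's dict loop: index fold over the boxes list -> fold over the list -> counter
  have hdict := PySem.List.foldl_pyRange_zero_pyGetD' (L.map (fun n => pvDsLoop n 0)) (0 : Int)
        (fun d k => if ¬ (d.contains k = true) then d.insert k 1
                    else d.insert k (d.getD k 0 + 1)) (PySem.Dict.empty : PySem.Dict Int Int)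
  rw [hdict, pvA_dict]
  -- B's fused loop: fold over the mapped keys, giving the same counter
  have hB : L.foldl
      (fun (d : PySem.Dict Int Int) n => d.insert (pvDsLoop n 0) (d.getD (pvDsLoop n 0) 0 + 1))
      PySem.Dict.empty
      = PySem.Dict.counter (L.map (fun n => pvDsLoop n 0)) := by
    rw [← PySem.Dict.foldl_insert_getD_add_one_eq_counter, List.foldl_map]
  rw [hB]

-- ===== VERDICT (by name: the statement is the Claim_ definition above) =====
theorem countBalls_spec : Claim_equal_countBalls := by
  intro lowLimit highLimit _ hpre
  show countBalls lowLimit highLimit = countBalls_alt lowLimit highLimit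
  exact pvMain lowLimit highLimit hpre.1
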